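-- pv_equiv track=rewrite | github.com/archman/opi-generator | opimodel/utils.py | mangle_name
-- ===== SOURCE A (Python) =====
-- def mangle_name(name):
--     """Convert the name found in a color or font configuration file into
--        a Python variable:
--            - convert to upper-case
--            - replace non-letters with underscores
--            - avoid consecutive underscores
--
--     Args:
--         name to convert
--     Returns:
--         converted name
--     """
--     last = ''
--     deduped = []
--     for char in name:
--         if char.isalpha() or char.isdigit():
--             last = char
--         else:
--             if last == '_':
--                 continue
--             else:
--                 char = '_'
--         last = char
--         deduped.append(char)
--
--     name = ''.join(deduped).upper()
--     return name
-- ===== SOURCE B (Python) =====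
-- from itertools import groupby
--
-- def mangle_name(name):
--     pieces = []
--     for is_word, run in groupby(name, key=lambda c: c.isalpha() or c.isdigit()):
--         if is_word:
--             pieces.extend(run)
--         else:
--             pieces.append('_')
--     return ''.join(pieces).upper()
-- ===== Notes on version B (the rewrite author's own statement) =====
-- stated objective: simpler
-- what changed: Replaces the stateful last-character loop with itertools.groupby runs: alphanumeric runs are kept, each non-alphanumeric run becomes a single underscore.
import Mathlib
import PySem

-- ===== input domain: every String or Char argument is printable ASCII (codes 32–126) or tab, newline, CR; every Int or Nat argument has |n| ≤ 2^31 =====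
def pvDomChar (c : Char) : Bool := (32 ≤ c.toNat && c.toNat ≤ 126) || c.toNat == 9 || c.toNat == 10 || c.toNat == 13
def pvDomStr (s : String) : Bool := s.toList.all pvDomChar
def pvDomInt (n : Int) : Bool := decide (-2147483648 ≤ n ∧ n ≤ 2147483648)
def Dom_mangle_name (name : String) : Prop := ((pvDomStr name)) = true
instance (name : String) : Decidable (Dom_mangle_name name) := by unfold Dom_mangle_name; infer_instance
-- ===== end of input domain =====

-- B replaces A's stateful last-character loop by run-grouping (groupby): simpler decomposition, same O(n) cost.


-- ===== PORT A =====
-- char.isalpha() or char.isdigit()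
def pvIsAl (c : Char) : Bool := PySem.Chars.isalpha c || PySem.Chars.isdigit c

-- A's loop: state `last` (a Python string), appending to `deduped` (built by cons here,
-- the obvious structural recursion producing the same list)
def mangleGoA (last : String) : List Char → List Char
  | [] => []
  | c :: rest =>
    if pvIsAl c then c :: mangleGoA (String.ofList [c]) rest
    else if last == "_" then mangleGoA last rest
    else '_' :: mangleGoA "_" rest

def mangle_name (name : String) : String :=
  PySem.Str.upper (String.ofList (mangleGoA "" name.toList))

-- ===== PORT B =====
-- groupby over the key pvIsAl: keep alphanumeric runs, one '_' per non-alphanumeric run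
def mangleGoB : List Char → List Char
  | [] => []
  | c :: rest =>
    if _h : pvIsAl c then
      (c :: rest).takeWhile pvIsAl ++ mangleGoB ((c :: rest).dropWhile pvIsAl)
    else
      '_' :: mangleGoB ((c :: rest).dropWhile (fun x => !pvIsAl x))
termination_by l => l.length
decreasing_by
  · rw [List.dropWhile_cons_of_pos _h]
    simpa using Nat.lt_succ_of_le (List.length_dropWhile_le pvIsAl rest)
  · have e : List.dropWhile (fun x => !pvIsAl x) (c :: rest)
        = List.dropWhile (fun x => !pvIsAl x) rest :=
      List.dropWhile_cons_of_pos (by simp_all)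
    rw [e]
    simpa using Nat.lt_succ_of_le (List.length_dropWhile_le (fun x => !pvIsAl x) rest)

def mangle_name_alt (name : String) : String :=
  PySem.Str.upper (String.ofList (mangleGoB name.toList))

-- ===== PRECONDITION & SPEC =====
def Spec_mangle_name (name : String) (out : String) : Prop := out = mangle_name_alt name
instance (name : String) (out : String) : Decidable (Spec_mangle_name name out) := by unfold Spec_mangle_name; infer_instance

-- ===== CLAIM (what is proved, stated in full; the proofs are below) =====
def Claim_equal_mangle_name : Prop := ∀ (name : String), Dom_mangle_name name → Spec_mangle_name name (mangle_name name)

-- ===== LEMMAS AND PROOFS =====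

theorem mangleGoB_cons_al {c : Char} (h : pvIsAl c = true) (rest : List Char) :
    mangleGoB (c :: rest) = c :: mangleGoB rest := by
  rw [mangleGoB, dif_pos h, List.takeWhile_cons_of_pos h, List.dropWhile_cons_of_pos h]
  cases rest with
  | nil => simp [mangleGoB]
  | cons d ds =>
    by_cases hd : pvIsAl d = true
    · rw [mangleGoB, dif_pos hd]
      simp
    · simp [List.takeWhile_cons_of_neg hd, List.dropWhile_cons_of_neg hd]

theorem mk_single_ne_underscore {c : Char} (h : pvIsAl c = true) :
    (String.ofList [c] == "_") = false := by
  have hc : c ≠ '_' := by rintro rfl; exact absurd h (by decide)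
  rw [beq_eq_false_iff_ne]
  intro he
  exact hc (by simpa using congrArg String.toList he)

theorem mangleGoA_eq (l : List Char) : ∀ last : String,
    mangleGoA last l =
      if last == "_" then mangleGoB (l.dropWhile (fun x => !pvIsAl x))
      else mangleGoB l := by
  induction l with
  | nil => intro last; simp [mangleGoA, mangleGoB]
  | cons c rest ih =>
    intro last
    by_cases hc : pvIsAl c = true
    · have hdrop : (c :: rest).dropWhile (fun x => !pvIsAl x) = c :: rest := by
        simp [hc]
      rw [mangleGoA, if_pos hc, ih (String.ofList [c]), mk_single_ne_underscore hc]
      rw [hdrop, mangleGoB_cons_al hc]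
      simp
    · have hc' : pvIsAl c = false := Bool.eq_false_iff.mpr hc
      have hdrop : (c :: rest).dropWhile (fun x => !pvIsAl x)
          = rest.dropWhile (fun x => !pvIsAl x) := by
        simp [hc']
      by_cases hl : (last == "_") = true
      · rw [mangleGoA, if_neg (by simp [hc']), if_pos hl, ih last, if_pos hl, hl, if_pos rfl, hdrop]
      · have hl' : (last == "_") = false := Bool.eq_false_iff.mpr hl
        rw [mangleGoA, if_neg (by simp [hc']), if_neg (by simp [hl']), ih "_"]
        rw [if_pos (by simp : (("_" : String) == "_") = true), if_neg (by simp [hl'])]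
        rw [mangleGoB, dif_neg (by simp [hc']), hdrop]

-- ===== VERDICT (by name: the statement is the Claim_ definition above) =====
theorem mangle_name_spec : Claim_equal_mangle_name := by
  intro name _
  unfold Spec_mangle_name mangle_name mangle_name_alt
  rw [mangleGoA_eq]
  simp
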